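-- pv_equiv track=rewrite | github.com/NicholasHeim/PartitionCreator | main.py | findLegalBlock
-- ===== SOURCE A (Python) =====
-- def findLegalBlock(partition):
--
--    newUnique = set()
--
--    # Steps to find a movable block:
--    #  Loop through every (i, j) in the partition
--    #  If, at (i, j), the following are true:
--    #     1. partition[i + 1][j] < partition[i][j]
--    #     2. partition[i][j + 1] < partition[i][j]
--    # Note that both conditions must be true.
--    # Then we call findLegalPositions
--    for i, row in enumerate(partition):
--       for j, __ in enumerate(row):
--          checks = [False, False]
--
--          try:
--             if partition[i + 1][j] >= partition[i][j]: continue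
--
--             checks[0] = True
--          # All exceptions will be an out of bounds error
--          # They only mean that we do not have to check a value here
--          except: pass
--
--          try:
--             if partition[i][j + 1] >= partition[i][j]: continue
--
--             checks[1] = True
--          # All exceptions will be an out of bounds error
--          # They only mean that we do not have to check a value here
--          except: pass
--
--          if checks[0] == True and checks[1] == True:
--             newUnique.update(findLegalPositions(partition, i, j))
--
--    return newUnique
--
-- def findLegalPositions(partition, i, j):
--
--    newParts = set()
--
--    # Convert the tuple partition into a list for editing
--    listPart = [list(row) for row in partition]
--
--    # Decrement the height at position (i, j)
--    listPart[i][j] -= 1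
--
--    # Find all legal movements of the block by checking the following conditions:
--    #     1. listPart[x - 1][y] > listPart[x][y]
--    #     2. listPart[x][y - 1] > listPart[x][y]
--    # Note that both conditions must be true.
--    for x, row in enumerate(listPart):
--       for y, __ in enumerate(row):
--          checks = [False, False]
--
--          if(x == 0):
--             checks[0] = True
--
--             if listPart[x][y - 1] <= listPart[x][y]:
--                continue
--             checks[1] = True
--          elif(y == 0):
--             if listPart[x - 1][y] <= listPart[x][y]:
--                continue
--             checks[0] = True
--
--             checks[1] = True
--          else:
--             if listPart[x - 1][y] <= listPart[x][y]:
--                continue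
--             checks[0] = True
--
--             if listPart[x][y - 1] <= listPart[x][y]:
--                continue
--             checks[1] = True
--
--          if checks[0] == True and checks[1] == True:
--             listPart[x][y] += 1
--             tPart = tuple([tuple(row) for row in listPart])
--             newParts.add(tPart)
--             listPart[x][y] -= 1
--
--    return newParts
-- ===== SOURCE B (Python) =====
-- def splice(L, P):
--    # Ordered merge: walk the precomputed legal-coordinate list L (row-major)
--    # and the (at most 3) patched cells P = [(coord, legal_now)], producing the
--    # landing coordinates of the current grid in row-major order.
--    out = []
--    P = list(P)
--    for c in L:
--       while P and P[0][0] < c: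
--          k, b = P.pop(0)
--          if b:
--             out.append(k)
--       if P and P[0][0] == c:
--          k, b = P.pop(0)
--          if b:
--             out.append(k)
--       else:
--          out.append(c)
--    for k, b in P:
--       if b:
--          out.append(k)
--    return out
--
--
-- def findLegalBlock(partition):
--    # B: compute the row-major list of base-legal landing coordinates ONCE;
--    # for each movable block, obtain its landing list by an ordered merge of
--    # that list with the 3 cells whose legality the decrement can change —
--    # no per-block scan over the grid's cells.
--    g = [list(row) for row in partition]
--    n = len(g)
--
--    cells = [(x, y) for x in range(n) for y in range(len(g[x]))]
--
--    sources = [(i, j) for (i, j) in cells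
--               if i + 1 < n and j + 1 < len(g[i]) and j < len(g[i + 1])
--               and g[i + 1][j] < g[i][j] and g[i][j + 1] < g[i][j]]
--
--    out = set()
--    if not sources:
--       return out
--
--    def legal(x, y):
--       # Can a block land at (x, y) of the current grid g?
--       v = g[x][y]
--       if x == 0:
--          return g[0][y - 1] > v
--       if y == 0:
--          return g[x - 1][0] > v
--       return g[x - 1][y] > v and g[x][y - 1] > v
--
--    L = [c for c in cells if legal(*c)]
--
--    for (i, j) in sources:
--       g[i][j] -= 1
--       P = [((i, j), legal(i, j)), ((i, j + 1), legal(i, j + 1)),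
--            ((i + 1, j), legal(i + 1, j))]
--       for (x, y) in splice(L, P):
--          g[x][y] += 1
--          out.add(tuple(tuple(r) for r in g))
--          g[x][y] -= 1
--       g[i][j] += 1
--    return out
-- ===== Notes on version B (the rewrite author's own statement) =====
-- stated objective: alternative
-- what changed: A re-runs its full branchy per-cell legality scan over a freshly mutated grid for every movable block; B computes the row-major list of base-legal landing coordinates once and, per movable block, derives that block's landing list by an ordered two-list merge (splice) of the precomputed coordinate list with the 3 cells whose legality the decrement can change, so the per-block scan over all cells disappears.
import Mathlib
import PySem

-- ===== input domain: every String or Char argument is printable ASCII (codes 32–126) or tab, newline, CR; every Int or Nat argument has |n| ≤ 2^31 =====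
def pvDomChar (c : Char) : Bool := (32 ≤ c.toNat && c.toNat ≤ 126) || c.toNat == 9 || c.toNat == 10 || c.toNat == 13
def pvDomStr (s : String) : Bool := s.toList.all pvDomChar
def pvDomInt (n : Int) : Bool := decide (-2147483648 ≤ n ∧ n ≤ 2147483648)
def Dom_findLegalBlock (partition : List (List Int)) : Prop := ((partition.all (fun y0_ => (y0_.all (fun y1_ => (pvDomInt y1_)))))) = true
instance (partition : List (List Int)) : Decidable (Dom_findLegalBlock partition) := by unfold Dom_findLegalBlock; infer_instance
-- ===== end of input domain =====

-- B computes the base-legal landing coordinates once and, per movable block, obtains that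
-- block's landing list by an ordered merge with the 3 patched cells instead of A's full
-- per-block scan of every cell (objective: alternative; return value only).

-- ===== PORT A =====

-- partition[x][y]; in Python every such read inside findLegalPositions that is out of
-- range raises IndexError — those inputs are exactly the ones excluded by Pre_ below,
-- so the getD default is never reached on admitted inputs.
def aAt (g : List (List Int)) (x y : Nat) : Int := (g.getD x []).getD y 0

-- partition[x][y] as an Option (none = IndexError, caught by A's try/except)
def aGet2? (g : List (List Int)) (x y : Nat) : Option Int := g[x]?.bind (fun r => r[y]?)

-- row[y - 1] with Python's negative-index wrap (y = 0 reads the last element)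
def aWrapGet (row : List Int) (y : Nat) : Int := (PySem.List.pyGet? row ((y : Int) - 1)).getD 0

-- listPart[x][y] += 1; snapshot; listPart[x][y] -= 1  ==> add the incremented grid
def aPosAdd (lp : List (List Int)) (x y : Nat) (acc : PySem.Set (List (List Int))) :
    PySem.Set (List (List Int)) :=
  PySem.Set.add acc (lp.modify x (fun row => row.modify y (fun v => v + 1)))

-- the body of findLegalPositions' inner loop (checks/continue control flow)
def aPosCell (lp : List (List Int)) (x y : Nat) (acc : PySem.Set (List (List Int))) :
    PySem.Set (List (List Int)) :=
  let w := aAt lp x y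
  if x = 0 then
    -- checks[0] = True
    if aWrapGet (lp.getD 0 []) y ≤ w then acc else aPosAdd lp x y acc
  else if y = 0 then
    if aAt lp (x - 1) y ≤ w then acc else aPosAdd lp x y acc
  else
    if aAt lp (x - 1) y ≤ w then acc
    else if aAt lp x (y - 1) ≤ w then acc
    else aPosAdd lp x y acc

def aPositions (partition : List (List Int)) (i j : Nat) : PySem.Set (List (List Int)) :=
  let listPart := partition.map (fun row => row)
  let lp := listPart.modify i (fun row => row.modify j (fun v => v - 1))
  (PySem.List.enumerate lp).foldl (fun acc xr =>
    (PySem.List.enumerate xr.2).foldl (fun acc2 yv => aPosCell lp xr.1.toNat yv.1.toNat acc2) acc)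
    PySem.Set.empty

-- second try-block of findLegalBlock's cell (c0 = checks[0] after the first try)
def aBlockCell2 (partition : List (List Int)) (i j : Nat) (c0 : Bool)
    (acc : PySem.Set (List (List Int))) : PySem.Set (List (List Int)) :=
  match aGet2? partition i (j + 1) with
  | some r =>
      if r ≥ aAt partition i j then acc
      else if c0 then PySem.Set.update acc (aPositions partition i j) else acc
  | none => acc   -- IndexError caught: checks[1] stays False, no update

def aBlockCell (partition : List (List Int)) (i j : Nat)
    (acc : PySem.Set (List (List Int))) : PySem.Set (List (List Int)) :=
  match aGet2? partition (i + 1) j with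
  | some b => if b ≥ aAt partition i j then acc else aBlockCell2 partition i j true acc
  | none => aBlockCell2 partition i j false acc   -- IndexError caught: checks[0] stays False

def findLegalBlock (partition : List (List Int)) : List (List (List Int)) :=
  (PySem.List.enumerate partition).foldl (fun acc ir =>
    (PySem.List.enumerate ir.2).foldl (fun acc2 jv =>
      aBlockCell partition ir.1.toNat jv.1.toNat acc2) acc)
    PySem.Set.empty

-- ===== PORT B =====

-- g[x][y] (same IndexError remark as for aAt: defaults unreachable inside Pre_)
def bAt (g : List (List Int)) (x y : Nat) : Int := (g.getD x []).getD y 0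

-- the cells comprehension: every coordinate, row-major
def bCells (g : List (List Int)) : List (Nat × Nat) :=
  (List.range g.length).flatMap (fun x =>
    (List.range ((g.getD x []).length)).map (fun y => (x, y)))

-- the sources condition: (i, j) has a strictly lower cell below and to the right
def bCand (g : List (List Int)) (i j : Nat) : Bool :=
  decide (i + 1 < g.length) && decide (j + 1 < (g.getD i []).length) &&
    decide (j < (g.getD (i + 1) []).length) &&
    decide (bAt g (i + 1) j < bAt g i j) && decide (bAt g i (j + 1) < bAt g i j)

-- legal(x, y): can a block land at (x, y)?  g[0][y-1] wraps at y = 0.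
def bLegal (g : List (List Int)) (x y : Nat) : Bool :=
  let v := bAt g x y
  if x = 0 then decide ((PySem.List.pyGet? (g.getD 0 []) ((y : Int) - 1)).getD 0 > v)
  else if y = 0 then decide (bAt g (x - 1) 0 > v)
  else decide (bAt g (x - 1) y > v) && decide (bAt g x (y - 1) > v)

-- Python tuple '<' on coordinate pairs (lexicographic)
def plt (a b : Nat × Nat) : Bool := a.1 < b.1 || (a.1 == b.1 && a.2 < b.2)

-- splice(L, P): ordered merge of the base landing list with the patched cells
def bSplice : List (Nat × Nat) → List ((Nat × Nat) × Bool) → List (Nat × Nat)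
  | L, [] => L
  | [], (k, b) :: P => (if b then [k] else []) ++ bSplice [] P
  | c :: L, (k, b) :: P =>
      if plt k c then (if b then [k] else []) ++ bSplice (c :: L) P
      else if k = c then (if b then [k] else []) ++ bSplice L P
      else c :: bSplice L ((k, b) :: P)
  termination_by L P => L.length + P.length
  decreasing_by all_goals (simp; try omega)

def findLegalBlock_alt (partition : List (List Int)) : List (List (List Int)) :=
  let g := partition.map (fun row => row)
  let cells := bCells g
  let sources := cells.filter (fun c => bCand g c.1 c.2)
  if sources.isEmpty then PySem.Set.empty
  else
    let L := cells.filter (fun c => bLegal g c.1 c.2)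
    sources.foldl (fun acc ij =>
      let g' := g.modify ij.1 (fun row => row.modify ij.2 (fun v => v - 1))
      let P := [((ij.1, ij.2), bLegal g' ij.1 ij.2),
                ((ij.1, ij.2 + 1), bLegal g' ij.1 (ij.2 + 1)),
                ((ij.1 + 1, ij.2), bLegal g' (ij.1 + 1) ij.2)]
      (bSplice L P).foldl (fun acc2 c =>
        PySem.Set.add acc2 (g'.modify c.1 (fun row => row.modify c.2 (fun v => v + 1)))) acc)
      PySem.Set.empty

-- ===== PRECONDITION & SPEC =====

-- every row is at most as long as the row above it
def pvMonoRows (g : List (List Int)) : Bool :=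
  (List.range g.length).all
    (fun x => decide (x + 1 < g.length → (g.getD (x + 1) []).length ≤ (g.getD x []).length))

-- a movable block at (i, j): the cells below and to the right exist and are strictly lower
def pvCandAt (g : List (List Int)) (i j : Nat) : Bool :=
  decide (i + 1 < g.length) && decide (j + 1 < (g.getD i []).length) &&
    decide (j < (g.getD (i + 1) []).length) &&
    decide ((g.getD (i + 1) []).getD j 0 < (g.getD i []).getD j 0) &&
    decide ((g.getD i []).getD (j + 1) 0 < (g.getD i []).getD j 0)

def pvHasCand (g : List (List Int)) : Bool :=
  (List.range g.length).any (fun i =>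
    (List.range ((g.getD i []).length)).any (fun j => pvCandAt g i j))

-- Pre_ excludes exactly the inputs on which Python A raises an uncaught IndexError in
-- findLegalPositions: a movable block exists AND some row is longer than the row above it.
def Pre_findLegalBlock (partition : List (List Int)) : Prop :=
  (pvMonoRows partition || !pvHasCand partition) = true
instance (partition : List (List Int)) : Decidable (Pre_findLegalBlock partition) := by
  unfold Pre_findLegalBlock; infer_instance

def pvWitness_findLegalBlock : List (List Int) := [[3, 2, 1], [2, 1], [1]]

def Spec_findLegalBlock (partition : List (List Int)) (out : List (List (List Int))) : Prop :=
  out = findLegalBlock_alt partition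
instance (partition : List (List Int)) (out : List (List (List Int))) :
    Decidable (Spec_findLegalBlock partition out) := by unfold Spec_findLegalBlock; infer_instance

-- ===== CLAIM (what is proved, stated in full; the proofs are below) =====
def Claim_equal_findLegalBlock : Prop := ∀ (partition : List (List Int)),
  Dom_findLegalBlock partition → Pre_findLegalBlock partition →
    Spec_findLegalBlock partition (findLegalBlock partition)

-- ===== LEMMAS AND PROOFS =====

theorem upd_add {α : Type} [BEq α] [LawfulBEq α] (s u : PySem.Set α) (x : α) :
    PySem.Set.update s (PySem.Set.add u x) = PySem.Set.add (PySem.Set.update s u) x := by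
  by_cases h : PySem.Set.contains u x = true
  · rw [show PySem.Set.add u x = u from by
      simp [PySem.Set.add, (PySem.Set.contains_iff u x).mp h]]
    have hx : x ∈ PySem.Set.update s u := by
      rw [PySem.Set.mem_update]; right; exact (PySem.Set.contains_iff u x).mp h
    simp [PySem.Set.add, hx]
  · rw [show PySem.Set.add u x = u ++ [x] from by
      simp only [PySem.Set.add]; rw [if_neg h]]
    rw [PySem.Set.update_append]
    rfl

theorem upd_upd {α : Type} [BEq α] [LawfulBEq α] (L : List α) (s u : PySem.Set α) :
    PySem.Set.update s (PySem.Set.update u L) = PySem.Set.update (PySem.Set.update s u) L := by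
  induction L generalizing u with
  | nil => rfl
  | cons x L ih => rw [PySem.Set.update_cons, ih, PySem.Set.update_cons, upd_add]

theorem upd_ofList {α : Type} [BEq α] [LawfulBEq α] (s : PySem.Set α) (L : List α) :
    PySem.Set.update s (PySem.Set.ofList L) = PySem.Set.update s L := by
  have h : PySem.Set.ofList L = PySem.Set.update PySem.Set.empty L := rfl
  rw [h, upd_upd]; rfl

theorem foldl_enum {α β : Type} (f : β → Nat → α → β) (d : α) : ∀ (l : List α) (s : Nat) (init : β),
    (PySem.List.enumerate l (s : Int)).foldl (fun acc kv => f acc kv.1.toNat kv.2) init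
      = (List.range l.length).foldl (fun acc k => f acc (s + k) (l.getD k d)) init := by
  intro l
  induction l with
  | nil => intro s init; rfl
  | cons x xs ih =>
      intro s init
      rw [PySem.List.enumerate_cons, List.foldl_cons]
      have h := ih (s + 1) (f init (s : Int).toNat x)
      push_cast at h
      rw [h]
      have hr : List.range (x :: xs).length = 0 :: (List.range xs.length).map (· + 1) := by
        simp [List.range_succ_eq_map]
      rw [hr, List.foldl_cons, List.foldl_map]
      simp only [List.getD_cons_zero, List.getD_cons_succ, Int.toNat_natCast]
      congr 1
      funext acc k
      congr 1
      omega

theorem getD_modify {α : Type} (l : List α) (i x : Nat) (f : α → α) (d : α) :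
    (l.modify i f).getD x d = if i = x then ((l[x]?.map f).getD d) else l.getD x d := by
  rw [List.getD_eq_getElem?_getD, List.getElem?_modify, List.getD_eq_getElem?_getD]
  by_cases h : i = x
  · cases hx : l[x]? <;> simp [h]
  · cases hx : l[x]? <;> simp [h]

theorem getD_row_modify (g : List (List Int)) (i j x : Nat) (f : Int → Int) :
    ((g.modify i (fun row => row.modify j f)).getD x []).length = ((g.getD x []).length) := by
  rw [getD_modify]
  by_cases h : i = x
  · cases hx : g[x]? <;> simp [h, hx, List.length_modify, List.getD_eq_getElem?_getD]
  · simp [h]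

theorem bAt_modify (g : List (List Int)) (i j x y : Nat) (f : Int → Int)
    (hj : j < (g.getD i []).length) :
    bAt (g.modify i (fun row => row.modify j f)) x y
      = if i = x ∧ j = y then f (bAt g x y) else bAt g x y := by
  have hi : i < g.length := by
    by_contra h
    have h2 : g.getD i [] = [] := by
      rw [List.getD_eq_getElem?_getD, List.getElem?_eq_none (by omega)]; rfl
    rw [h2] at hj; simp at hj
  have hD : g.getD i [] = g[i] := by
    rw [List.getD_eq_getElem?_getD, List.getElem?_eq_getElem hi]; rfl
  unfold bAt
  rw [getD_modify]
  by_cases hix : i = x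
  · subst hix
    simp only [List.getElem?_eq_getElem hi, Option.map_some, Option.getD_some, true_and, ← hD]
    rw [if_pos trivial, getD_modify]
    by_cases hjy : j = y
    · subst hjy
      rw [hD] at hj ⊢
      simp [List.getElem?_eq_getElem hj]
    · simp [hjy]
  · simp [hix]

theorem wrap_eq (row : List Int) (y : Nat) :
    (PySem.List.pyGet? row ((y : Int) - 1)).getD 0
      = if y = 0 then row.getD (row.length - 1) 0 else row.getD (y - 1) 0 := by
  cases y with
  | zero =>
      rw [if_pos rfl]
      simp only [PySem.List.pyGet?, PySem.List.pyIdx?, Nat.cast_zero]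
      cases row with
      | nil => rfl
      | cons a row =>
          have hlen : (1:Int) ≤ ((a :: row).length : Int) := by
            have : 1 ≤ (a :: row).length := by simp
            exact_mod_cast this
          rw [if_neg (by omega : ¬ ((0:Int) ≤ (0:Int) - 1)),
            if_pos (by omega : -((a :: row).length : Int) ≤ (0:Int) - 1)]
          simp only [Option.bind_some]
          have h1 : ((a :: row).length - (-((0:Int) - 1)).toNat) = (a :: row).length - 1 := by
            norm_num
          rw [h1, List.getD_eq_getElem?_getD,
            List.getElem?_eq_getElem (by simp : (a :: row).length - 1 < (a :: row).length)]
  | succ y' =>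
      rw [if_neg (by omega : ¬ (y' + 1 = 0))]
      simp only [PySem.List.pyGet?, PySem.List.pyIdx?]
      rw [if_pos (by push_cast; omega : (0:Int) ≤ ((y' + 1 : Nat) : Int) - 1)]
      by_cases h1 : ((y' + 1 : Nat) : Int) - 1 < (row.length : Int)
      · rw [if_pos h1]
        simp only [Option.bind_some]
        have ht : (((y' + 1 : Nat) : Int) - 1).toNat = y' := by push_cast; omega
        rw [ht, (by omega : y' + 1 - 1 = y'), List.getD_eq_getElem?_getD]
      · rw [if_neg h1]
        have hge : row.length ≤ y' := by push_cast at h1; omega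
        have h2 : y' + 1 - 1 = y' := by omega
        rw [h2, List.getD_eq_getElem?_getD, List.getElem?_eq_none (by omega)]
        rfl

theorem cellD_modify (g : List (List Int)) (i j x y : Nat) (f : Int → Int)
    (hj : j < (g.getD i []).length) :
    ((g.modify i (fun row => row.modify j f)).getD x []).getD y 0
      = if i = x ∧ j = y then f ((g.getD x []).getD y 0) else (g.getD x []).getD y 0 := by
  have h := bAt_modify g i j x y f hj
  unfold bAt at h
  exact h

def cellPairs (n : Nat) (len : Nat → Nat) : List (Nat × Nat) :=
  (List.range n).flatMap (fun x => (List.range (len x)).map (fun y => (x, y)))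

def foldCells {β : Type} (n : Nat) (len : Nat → Nat) (step : β → Nat → Nat → β) (init : β) : β :=
  (List.range n).foldl (fun a x => (List.range (len x)).foldl (fun a2 y => step a2 x y) a) init

theorem foldCells_congr {β : Type} (n : Nat) (len : Nat → Nat) (f f' : β → Nat → Nat → β)
    (init : β) (h : ∀ a x y, x < n → y < len x → f a x y = f' a x y) :
    foldCells n len f init = foldCells n len f' init := by
  unfold foldCells
  apply PySem.List.foldl_congr_mem
  intro acc x hx
  apply PySem.List.foldl_congr_mem
  intro acc2 y hy
  exact h _ _ _ (List.mem_range.mp hx) (List.mem_range.mp hy)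

theorem foldCells_eq_pairs {β : Type} (n : Nat) (len : Nat → Nat) (step : β → Nat → Nat → β)
    (init : β) :
    foldCells n len step init = (cellPairs n len).foldl (fun a c => step a c.1 c.2) init := by
  unfold foldCells cellPairs
  rw [List.foldl_flatMap]
  simp only [List.foldl_map]

theorem foldl_condAdd {γ α : Type} [BEq α] [LawfulBEq α] (P : γ → Bool) (G : γ → α) :
    ∀ (L : List γ) (a : PySem.Set α),
      L.foldl (fun acc c => if P c then PySem.Set.add acc (G c) else acc) a
        = PySem.Set.update a ((L.filter P).map G) := by
  intro L
  induction L with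
  | nil => intro a; rfl
  | cons c L ih =>
      intro a
      rw [List.foldl_cons, List.filter_cons]
      by_cases h : P c
      · rw [if_pos h, if_pos h, List.map_cons, PySem.Set.update_cons, ih]
      · rw [if_neg h, if_neg h, ih]

theorem aPosCell_eq (h : List (List Int)) (x y : Nat) (acc : PySem.Set (List (List Int))) :
    aPosCell h x y acc = if bLegal h x y then aPosAdd h x y acc else acc := by
  unfold aPosCell bLegal aAt bAt aWrapGet
  by_cases hx : x = 0
  · rw [if_pos hx, if_pos hx]
    by_cases hw : (PySem.List.pyGet? (h.getD 0 []) ((y : Int) - 1)).getD 0 ≤ (h.getD x []).getD y 0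
    · rw [if_pos hw, if_neg (by simp only [decide_eq_true_eq]; omega)]
    · rw [if_neg hw, if_pos (by simp only [decide_eq_true_eq]; omega)]
  · rw [if_neg hx, if_neg hx]
    by_cases hy : y = 0
    · subst hy
      rw [if_pos rfl, if_pos rfl]
      by_cases hu : (h.getD (x - 1) []).getD 0 0 ≤ (h.getD x []).getD 0 0
      · rw [if_pos hu, if_neg (by simp only [decide_eq_true_eq]; omega)]
      · rw [if_neg hu, if_pos (by simp only [decide_eq_true_eq]; omega)]
    · rw [if_neg hy, if_neg hy]
      by_cases hu : (h.getD (x - 1) []).getD y 0 ≤ (h.getD x []).getD y 0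
      · rw [if_pos hu, if_neg (by simp only [Bool.and_eq_true, decide_eq_true_eq]; omega)]
      · rw [if_neg hu]
        by_cases hl : (h.getD x []).getD (y - 1) 0 ≤ (h.getD x []).getD y 0
        · rw [if_pos hl, if_neg (by simp only [Bool.and_eq_true, decide_eq_true_eq]; omega)]
        · rw [if_neg hl, if_pos (by simp only [Bool.and_eq_true, decide_eq_true_eq]; exact ⟨by omega, by omega⟩)]

theorem bLegal_modify (g : List (List Int)) (i j x y : Nat)
    (hj1 : j + 1 < (g.getD i []).length)
    (h1 : ¬(x = i ∧ y = j)) (h2 : ¬(x = i + 1 ∧ y = j)) (h3 : ¬(x = i ∧ y = j + 1)) :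
    bLegal (g.modify i (fun row => row.modify j (fun v => v - 1))) x y = bLegal g x y := by
  have hj : j < (g.getD i []).length := by omega
  have hv : bAt (g.modify i (fun row => row.modify j (fun v => v - 1))) x y = bAt g x y := by
    rw [bAt_modify g i j x y _ hj, if_neg (by omega)]
  simp only [bLegal]
  rw [hv]
  by_cases hx : x = 0
  · rw [if_pos hx, if_pos hx, wrap_eq, wrap_eq]
    have hlen : ((g.modify i (fun row => row.modify j (fun v => v - 1))).getD 0 []).length
        = (g.getD 0 []).length := getD_row_modify g i j 0 _
    rw [hlen]
    by_cases hy : y = 0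
    · rw [if_pos hy, if_pos hy]
      have he : ((g.modify i (fun row => row.modify j (fun v => v - 1))).getD 0 []).getD
            ((g.getD 0 []).length - 1) 0
          = (g.getD 0 []).getD ((g.getD 0 []).length - 1) 0 := by
        rw [cellD_modify g i j 0 _ _ hj]
        by_cases hi0 : i = 0
        · subst hi0
          rw [if_neg (by omega)]
        · rw [if_neg (by intro hc; exact hi0 hc.1)]
      rw [he]
    · rw [if_neg hy, if_neg hy]
      have he : ((g.modify i (fun row => row.modify j (fun v => v - 1))).getD 0 []).getD (y - 1) 0
          = (g.getD 0 []).getD (y - 1) 0 := by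
        rw [cellD_modify g i j 0 _ _ hj,
          if_neg (by intro hc; rcases hc with ⟨ha, hb⟩; exact h3 ⟨by omega, by omega⟩)]
      rw [he]
  · rw [if_neg hx, if_neg hx]
    by_cases hy : y = 0
    · rw [if_pos hy, if_pos hy]
      have he : bAt (g.modify i (fun row => row.modify j (fun v => v - 1))) (x - 1) 0
          = bAt g (x - 1) 0 := by
        rw [bAt_modify g i j (x - 1) 0 _ hj,
          if_neg (by intro hc; rcases hc with ⟨ha, hb⟩; exact h2 ⟨by omega, by omega⟩)]
      rw [he]
    · rw [if_neg hy, if_neg hy]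
      have e1 : bAt (g.modify i (fun row => row.modify j (fun v => v - 1))) (x - 1) y
          = bAt g (x - 1) y := by
        rw [bAt_modify g i j (x - 1) y _ hj,
          if_neg (by intro hc; rcases hc with ⟨ha, hb⟩; exact h2 ⟨by omega, by omega⟩)]
      have e2 : bAt (g.modify i (fun row => row.modify j (fun v => v - 1))) x (y - 1)
          = bAt g x (y - 1) := by
        rw [bAt_modify g i j x (y - 1) _ hj,
          if_neg (by intro hc; rcases hc with ⟨ha, hb⟩; exact h3 ⟨by omega, by omega⟩)]
      rw [e1, e2]

theorem aGet2?_some (g : List (List Int)) (x y : Nat) (b : Int) (h : aGet2? g x y = some b) :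
    x < g.length ∧ y < (g.getD x []).length ∧ b = (g.getD x []).getD y 0 := by
  unfold aGet2? at h
  by_cases hx : x < g.length
  · rw [List.getElem?_eq_getElem hx, Option.bind_some] at h
    have hD : g.getD x [] = g[x] := by
      rw [List.getD_eq_getElem?_getD, List.getElem?_eq_getElem hx]; rfl
    by_cases hy : y < g[x].length
    · rw [List.getElem?_eq_getElem hy] at h
      refine ⟨hx, by rw [hD]; exact hy, ?_⟩
      rw [hD, List.getD_eq_getElem?_getD, List.getElem?_eq_getElem hy]
      exact (Option.some.injEq .. ▸ h).symm
    · rw [List.getElem?_eq_none (by omega)] at h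
      exact absurd h (by simp)
  · rw [List.getElem?_eq_none (by omega)] at h
    exact absurd h (by simp)

theorem aGet2?_none (g : List (List Int)) (x y : Nat) (h : aGet2? g x y = none) :
    ¬(x < g.length ∧ y < (g.getD x []).length) := by
  intro hc
  have hD : g.getD x [] = g[x] := by
    rw [List.getD_eq_getElem?_getD, List.getElem?_eq_getElem hc.1]; rfl
  unfold aGet2? at h
  rw [List.getElem?_eq_getElem hc.1, Option.bind_some,
    List.getElem?_eq_getElem (by rw [← hD]; exact hc.2)] at h
  exact absurd h (by simp)

theorem aBlockCell_eq (p : List (List Int)) (i j : Nat) (acc : PySem.Set (List (List Int))) :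
    aBlockCell p i j acc
      = if bCand p i j then PySem.Set.update acc (aPositions p i j) else acc := by
  unfold aBlockCell aBlockCell2 aAt bCand bAt
  split
  next b hb =>
    obtain ⟨hb1, hb2, hb3⟩ := aGet2?_some _ _ _ _ hb
    by_cases hbv : b ≥ (p.getD i []).getD j 0
    · rw [if_pos hbv, if_neg (by simp only [Bool.and_eq_true, decide_eq_true_eq]; omega)]
    · rw [if_neg hbv]
      split
      next r hr =>
        obtain ⟨hr1, hr2, hr3⟩ := aGet2?_some _ _ _ _ hr
        by_cases hrv : r ≥ (p.getD i []).getD j 0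
        · rw [if_pos hrv, if_neg (by simp only [Bool.and_eq_true, decide_eq_true_eq]; omega)]
        · rw [if_neg hrv, if_pos rfl,
            if_pos (by simp only [Bool.and_eq_true, decide_eq_true_eq]; omega)]
      next hr =>
        have hnr := aGet2?_none _ _ _ hr
        rw [if_neg (by simp only [Bool.and_eq_true, decide_eq_true_eq]; omega)]
  next hb =>
    have hnb := aGet2?_none _ _ _ hb
    split
    next r hr =>
      obtain ⟨hr1, hr2, hr3⟩ := aGet2?_some _ _ _ _ hr
      by_cases hrv : r ≥ (p.getD i []).getD j 0
      · rw [if_pos hrv, if_neg (by simp only [Bool.and_eq_true, decide_eq_true_eq]; omega)]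
      · rw [if_neg hrv, if_neg (by simp),
          if_neg (by simp only [Bool.and_eq_true, decide_eq_true_eq]; omega)]
    next hr =>
      have hnr := aGet2?_none _ _ _ hr
      rw [if_neg (by simp only [Bool.and_eq_true, decide_eq_true_eq]; omega)]

theorem foldl_enum0 {α β : Type} (f : β → Nat → α → β) (d : α) (l : List α) (init : β) :
    (PySem.List.enumerate l).foldl (fun acc kv => f acc kv.1.toNat kv.2) init
      = (List.range l.length).foldl (fun acc k => f acc k (l.getD k d)) init := by
  have h := foldl_enum f d l 0 init
  simpa using h

theorem nestedEnum_eq_foldCells {β : Type} (l : List (List Int)) (step : β → Nat → Nat → β)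
    (init : β) :
    (PySem.List.enumerate l).foldl (fun acc xr =>
        (PySem.List.enumerate xr.2).foldl (fun acc2 yv => step acc2 xr.1.toNat yv.1.toNat) acc)
      init
      = foldCells l.length (fun x => (l.getD x []).length) step init := by
  refine Eq.trans (foldl_enum0 (fun acc k row =>
    (PySem.List.enumerate row).foldl (fun acc2 yv => step acc2 k yv.1.toNat) acc) [] l init) ?_
  unfold foldCells
  apply PySem.List.foldl_congr_mem
  intro acc x _
  exact foldl_enum0 (fun acc2 j _ => step acc2 x j) 0 (l.getD x []) acc

-- ---- the ordered-merge (splice) machinery ----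

theorem plt_irrefl (a : Nat × Nat) : plt a a = false := by simp [plt]

theorem plt_asymm {a b : Nat × Nat} (h : plt a b = true) : plt b a = false := by
  obtain ⟨a1, a2⟩ := a; obtain ⟨b1, b2⟩ := b
  simp only [plt, Bool.or_eq_true, Bool.and_eq_true, decide_eq_true_eq, beq_iff_eq] at h
  simp only [plt, Bool.or_eq_false_iff, Bool.and_eq_false_iff, decide_eq_false_iff_not,
    beq_eq_false_iff_ne, ne_eq]
  by_cases hb : b1 = a1 <;> simp [hb] <;> omega

theorem plt_ne {a b : Nat × Nat} (h : plt a b = true) : a ≠ b := by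
  intro he; subst he; rw [plt_irrefl] at h; cases h

theorem lookup_none {β : Type} (c : Nat × Nat) :
    ∀ (P : List ((Nat × Nat) × β)), (∀ k ∈ P.map Prod.fst, k ≠ c) → List.lookup c P = none := by
  intro P
  induction P with
  | nil => intro _; rfl
  | cons kb P ih =>
      intro h
      have hne : (c == kb.1) = false :=
        beq_eq_false_iff_ne.mpr (Ne.symm (h kb.1 (by simp)))
      rw [show (kb :: P) = ((kb.1, kb.2) :: P) from rfl, List.lookup_cons, hne]
      exact ih (fun k hk => h k (by simp [hk]))

theorem bSplice_nilP (L : List (Nat × Nat)) : bSplice L [] = L := by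
  cases L <;> simp [bSplice]

theorem splice_filter (q : Nat × Nat → Bool) :
    ∀ (cells : List (Nat × Nat)) (P : List ((Nat × Nat) × Bool)),
      List.Pairwise (fun a b => plt a b = true) cells →
      List.Pairwise (fun a b => plt a b = true) (P.map Prod.fst) →
      (∀ k ∈ P.map Prod.fst, k ∈ cells) →
      bSplice (cells.filter q) P = cells.filter (fun c => (List.lookup c P).getD (q c)) := by
  intro cells
  induction cells with
  | nil =>
      intro P _ _ h3
      cases P with
      | nil => simp [bSplice_nilP]
      | cons kb P' => exact absurd (h3 kb.1 (by simp)) (by simp)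
  | cons c cs ih =>
      intro P h1 h2 h3
      obtain ⟨hc, h1'⟩ := List.pairwise_cons.mp h1
      cases P with
      | nil =>
          simp only [List.lookup_nil, Option.getD_none]
          exact bSplice_nilP _
      | cons kb P' =>
          obtain ⟨k, b⟩ := kb
          rw [List.map_cons] at h2 h3
          obtain ⟨hk, h2'⟩ := List.pairwise_cons.mp h2
          by_cases hkc : k = c
          · subst hkc
            -- keys of P' all lie in cs
            have hkeys' : ∀ k' ∈ P'.map Prod.fst, k' ∈ cs := by
              intro k' hm
              have hin := h3 k' (by simp [hm])
              have hne : k' ≠ k := fun he => by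
                have := hk k' hm; rw [he, plt_irrefl] at this; cases this
              exact (List.mem_cons.mp hin).resolve_left hne
            have hstep : bSplice ((k :: cs).filter q) ((k, b) :: P')
                = (if b then [k] else []) ++ bSplice (cs.filter q) P' := by
              by_cases hq : q k
              · rw [List.filter_cons, if_pos hq]
                rw [bSplice]
                rw [if_neg (by rw [plt_irrefl]; simp), if_pos rfl]
              · rw [List.filter_cons, if_neg (by simp [hq])]
                cases hfq : cs.filter q with
                | nil => rw [bSplice]
                | cons c' L'' =>
                    have hc' : c' ∈ cs :=
                      List.mem_of_mem_filter (hfq ▸ List.mem_cons_self (l := L''))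
                    have hpcc' : plt k c' = true := hc c' hc'
                    rw [bSplice, if_pos hpcc', ← hfq]
            rw [hstep, ih P' h1' h2' hkeys']
            rw [List.filter_cons]
            have hlk : (List.lookup k ((k, b) :: P')).getD (q k) = b := by
              rw [List.lookup_cons]; simp
            rw [hlk]
            have htail : cs.filter (fun c => (List.lookup c ((k, b) :: P')).getD (q c))
                = cs.filter (fun c => (List.lookup c P').getD (q c)) := by
              apply List.filter_congr
              intro x hx
              have hne : (x == k) = false :=
                beq_eq_false_iff_ne.mpr (Ne.symm (plt_ne (hc x hx)))
              rw [List.lookup_cons, hne]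
            rw [htail]
            cases b <;> simp
          · -- k ≠ c : every key lies in cs, c is unkeyed
            have hkcs : k ∈ cs := (List.mem_cons.mp (h3 k (by simp))).resolve_left hkc
            have hpck : plt c k = true := hc k hkcs
            have hkeys : ∀ k' ∈ ((k, b) :: P').map Prod.fst, k' ∈ cs := by
              intro k' hm
              rw [List.map_cons] at hm
              rcases List.mem_cons.mp hm with rfl | hm'
              · exact hkcs
              · have hne : k' ≠ c := by
                  intro he
                  have h4 := hk k' hm'
                  rw [he] at h4
                  rw [plt_asymm hpck] at h4
                  cases h4
                exact (List.mem_cons.mp (h3 k' (by simp [hm']))).resolve_left hne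
            have hlc : List.lookup c ((k, b) :: P') = none := by
              apply lookup_none
              intro k' hm
              rw [List.map_cons] at hm
              rcases List.mem_cons.mp hm with rfl | hm'
              · exact hkc
              · intro he
                have h4 := hk k' hm'
                rw [he] at h4
                rw [plt_asymm hpck] at h4
                cases h4
            have hIH := ih ((k, b) :: P') h1' h2 hkeys
            by_cases hq : q c
            · rw [List.filter_cons, if_pos hq, bSplice,
                if_neg (by rw [plt_asymm hpck]; simp), if_neg hkc, hIH,
                List.filter_cons, if_pos (by rw [hlc]; simpa using hq)]
            · rw [List.filter_cons, if_neg hq, hIH,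
                List.filter_cons, if_neg (by rw [hlc]; simpa using hq)]

theorem mem_cellPairs (n : Nat) (len : Nat → Nat) (x y : Nat) :
    (x, y) ∈ cellPairs n len ↔ x < n ∧ y < len x := by
  simp only [cellPairs, List.mem_flatMap, List.mem_map, List.mem_range, Prod.mk.injEq]
  constructor
  · rintro ⟨a, ha, b, hb, rfl, rfl⟩; exact ⟨ha, hb⟩
  · rintro ⟨hx, hy⟩; exact ⟨x, hx, y, hy, rfl, rfl⟩

theorem pairwise_cellPairs (n : Nat) (len : Nat → Nat) :
    List.Pairwise (fun a b => plt a b = true) (cellPairs n len) := by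
  unfold cellPairs
  rw [List.pairwise_flatMap]
  constructor
  · intro x _
    rw [List.pairwise_map]
    exact List.pairwise_lt_range.imp (fun h => by simp [plt]; omega)
  · apply List.pairwise_lt_range.imp
    intro x x' hxx' cpair hc dpair hd
    obtain ⟨yc, -, rfl⟩ := List.mem_map.mp hc
    obtain ⟨yd, -, rfl⟩ := List.mem_map.mp hd
    simp [plt]; omega

-- aPositions as an explicit first-occurrence list over the patched grid
theorem aPositions_eq (p : List (List Int)) (i j : Nat) :
    aPositions p i j
      = PySem.Set.ofList
          (((cellPairs p.length (fun x => (p.getD x []).length)).filter (fun c =>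
              bLegal (p.modify i (fun row => row.modify j (fun v => v - 1))) c.1 c.2)).map
            (fun c => (p.modify i (fun row => row.modify j (fun v => v - 1))).modify c.1
              (fun row => row.modify c.2 (fun v => v + 1)))) := by
  set g' := p.modify i (fun row => row.modify j (fun v => v - 1)) with hg
  have hlen : g'.length = p.length := by rw [hg]; exact List.length_modify ..
  have hrow : (fun x => (g'.getD x []).length) = (fun x => (p.getD x []).length) := by
    funext x; rw [hg]; exact getD_row_modify ..
  unfold aPositions
  simp only [List.map_id', ← hg]
  rw [nestedEnum_eq_foldCells g' (fun a x y => aPosCell g' x y a) PySem.Set.empty,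
    hlen, hrow,
    foldCells_congr _ _ _ (fun a x y => if bLegal g' x y then
      PySem.Set.add a (g'.modify x (fun row => row.modify y (fun v => v + 1))) else a) _
      (fun a x y _ _ => by rw [aPosCell_eq]; rfl),
    foldCells_eq_pairs,
    foldl_condAdd (fun c : Nat × Nat => bLegal g' c.1 c.2)
      (fun c : Nat × Nat => g'.modify c.1 (fun row => row.modify c.2 (fun v => v + 1)))]
  rfl

-- per movable block: A's update with aPositions is B's fold over the spliced landing list
theorem perSource (p : List (List Int)) (i j : Nat) (hcand : bCand p i j = true)
    (acc : PySem.Set (List (List Int))) :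
    PySem.Set.update acc (aPositions p i j)
      = (bSplice
          ((cellPairs p.length (fun x => (p.getD x []).length)).filter
            (fun c => bLegal p c.1 c.2))
          [((i, j), bLegal (p.modify i (fun row => row.modify j (fun v => v - 1))) i j),
           ((i, j + 1), bLegal (p.modify i (fun row => row.modify j (fun v => v - 1))) i (j + 1)),
           ((i + 1, j), bLegal (p.modify i (fun row => row.modify j (fun v => v - 1))) (i + 1) j)]).foldl
        (fun acc2 c =>
          PySem.Set.add acc2
            ((p.modify i (fun row => row.modify j (fun v => v - 1))).modify c.1
              (fun row => row.modify c.2 (fun v => v + 1)))) acc := by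
  set g' := p.modify i (fun row => row.modify j (fun v => v - 1)) with hg
  simp only [bCand, Bool.and_eq_true, decide_eq_true_eq] at hcand
  obtain ⟨⟨⟨⟨hi1, hj1⟩, hjr⟩, -⟩, -⟩ := hcand
  set cells := cellPairs p.length (fun x => (p.getD x []).length) with hcells
  set P := [((i, j), bLegal g' i j), ((i, j + 1), bLegal g' i (j + 1)),
            ((i + 1, j), bLegal g' (i + 1) j)] with hP
  have hsplice : bSplice (cells.filter (fun c => bLegal p c.1 c.2)) P
      = cells.filter (fun c => bLegal g' c.1 c.2) := by
    rw [splice_filter (fun c => bLegal p c.1 c.2) cells P (pairwise_cellPairs ..)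
      (by rw [hP]; simp [plt, List.pairwise_cons])
      (by
        rw [hP]
        intro k hk
        simp only [List.map_cons, List.map_nil] at hk
        rcases List.mem_cons.mp hk with rfl | hk
        · exact (mem_cellPairs ..).mpr ⟨by omega, by omega⟩
        rcases List.mem_cons.mp hk with rfl | hk
        · exact (mem_cellPairs ..).mpr ⟨by omega, by omega⟩
        rcases List.mem_cons.mp hk with rfl | hk
        · exact (mem_cellPairs ..).mpr ⟨by omega, by
            have := getD_row_modify p i j (i + 1) (fun v => v - 1)
            omega⟩
        · cases hk)]
    apply List.filter_congr
    intro c hcm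
    obtain ⟨x, y⟩ := c
    have hb0 : ∀ (u v u' v' : Nat), ¬(u = u' ∧ v = v') →
        (((u, v) : Nat × Nat) == (u', v')) = false :=
      fun u v u' v' h => beq_eq_false_iff_ne.mpr (by simp only [ne_eq, Prod.mk.injEq]; exact h)
    by_cases e1 : (x, y) = (i, j)
    · rw [hP, e1, List.lookup_cons]; simp
    by_cases e2 : (x, y) = (i, j + 1)
    · rw [hP, e2, List.lookup_cons, hb0 i (j + 1) i j (by omega), List.lookup_cons]
      simp
    by_cases e3 : (x, y) = (i + 1, j)
    · rw [hP, e3, List.lookup_cons, hb0 (i + 1) j i j (by omega), List.lookup_cons,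
        hb0 (i + 1) j i (j + 1) (by omega), List.lookup_cons]
      simp
    · have hlk : List.lookup (x, y) P = none := by
        apply lookup_none
        rw [hP]
        intro k hk
        simp only [List.map_cons, List.map_nil] at hk
        rcases List.mem_cons.mp hk with rfl | hk
        · exact fun he => e1 he.symm
        rcases List.mem_cons.mp hk with rfl | hk
        · exact fun he => e2 he.symm
        rcases List.mem_cons.mp hk with rfl | hk
        · exact fun he => e3 he.symm
        · cases hk
      rw [hlk, Option.getD_none]
      have hne1 : ¬(x = i ∧ y = j) := by
        intro h; exact e1 (by rw [h.1, h.2])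
      have hne2 : ¬(x = i + 1 ∧ y = j) := by
        intro h; exact e3 (by rw [h.1, h.2])
      have hne3 : ¬(x = i ∧ y = j + 1) := by
        intro h; exact e2 (by rw [h.1, h.2])
      exact (bLegal_modify p i j x y hj1 hne1 hne2 hne3).symm
  rw [hsplice, aPositions_eq, upd_ofList, ← hg]
  rw [show PySem.Set.update acc
      (((cells.filter (fun c => bLegal g' c.1 c.2)).map
        (fun c => g'.modify c.1 (fun row => row.modify c.2 (fun v => v + 1)))))
    = (((cells.filter (fun c => bLegal g' c.1 c.2)).map
        (fun c => g'.modify c.1 (fun row => row.modify c.2 (fun v => v + 1))))).foldl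
        PySem.Set.add acc from rfl]
  rw [List.foldl_map]

theorem A_norm (p : List (List Int)) :
    findLegalBlock p
      = ((cellPairs p.length (fun x => (p.getD x []).length)).filter
            (fun c => bCand p c.1 c.2)).foldl
          (fun acc ij => PySem.Set.update acc (aPositions p ij.1 ij.2)) PySem.Set.empty := by
  unfold findLegalBlock
  refine Eq.trans (nestedEnum_eq_foldCells p (fun a x y => aBlockCell p x y a)
    PySem.Set.empty) ?_
  refine Eq.trans (foldCells_congr _ _ _
    (fun a x y => if bCand p x y then PySem.Set.update a (aPositions p x y) else a) _
    (fun a x y _ _ => aBlockCell_eq p x y a)) ?_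
  refine Eq.trans (foldCells_eq_pairs _ _ _ _) ?_
  exact PySem.List.foldl_if_eq_foldl_filter (fun c : Nat × Nat => bCand p c.1 c.2)
    (fun a (c : Nat × Nat) => PySem.Set.update a (aPositions p c.1 c.2)) _ _

theorem AB_eq (p : List (List Int)) : findLegalBlock p = findLegalBlock_alt p := by
  rw [A_norm]
  unfold findLegalBlock_alt
  simp only [List.map_id']
  have hcells : bCells p = cellPairs p.length (fun x => (p.getD x []).length) := rfl
  rw [hcells]
  by_cases he : ((cellPairs p.length (fun x => (p.getD x []).length)).filter
      (fun c => bCand p c.1 c.2)).isEmpty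
  · rw [if_pos he, List.isEmpty_iff.mp he]
    rfl
  · rw [if_neg he]
    apply PySem.List.foldl_congr_mem
    intro acc ij hij
    have hcand : bCand p ij.1 ij.2 = true := (List.mem_filter.mp hij).2
    exact perSource p ij.1 ij.2 hcand acc

-- ===== VERDICT (by name: the statement is the Claim_ definition above) =====
theorem findLegalBlock_spec : Claim_equal_findLegalBlock := by
  intro p _ _
  unfold Spec_findLegalBlock
  exact AB_eq p
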